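-- pv_equiv track=rewrite | github.com/voidance13/CALIPER-agent | retriever.py | join_docs_text
-- ===== SOURCE A (Python) =====
-- from typing import List, Dict, Any
--
-- def join_docs_text(docs: List[str], max_chars: int = 4000) -> str:
--     """将检索到的文档拼接成一个上下文字符串，限制长度。"""
--     chunks = []
--     total = 0
--     for st in docs:
--         if total + len(st) > max_chars:
--             break
--         chunks.append(st)
--         total += len(st)
--     return " ".join(chunks)
-- ===== SOURCE B (Python) =====
-- def _bisect_right(cum, x):
--     lo, hi = 0, len(cum)
--     while lo < hi:
--         mid = (lo + hi) // 2
--         if cum[mid] <= x: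
--             lo = mid + 1
--         else:
--             hi = mid
--     return lo
--
-- def join_docs_text(docs, max_chars=4000):
--     """Prefix-sum table + binary search for the cutoff, then join a slice."""
--     cum = []
--     t = 0
--     for d in docs:
--         t += len(d)
--         cum.append(t)
--     k = _bisect_right(cum, max_chars)
--     return " ".join(docs[:k])
-- ===== Notes on version B (the rewrite author's own statement) =====
-- stated objective: alternative
-- what changed: Replaces the accumulate-and-break loop by building a prefix-length table and binary-searching it (hand-rolled bisect_right) for the cutoff index, then joining docs[:k].
import Mathlib
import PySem

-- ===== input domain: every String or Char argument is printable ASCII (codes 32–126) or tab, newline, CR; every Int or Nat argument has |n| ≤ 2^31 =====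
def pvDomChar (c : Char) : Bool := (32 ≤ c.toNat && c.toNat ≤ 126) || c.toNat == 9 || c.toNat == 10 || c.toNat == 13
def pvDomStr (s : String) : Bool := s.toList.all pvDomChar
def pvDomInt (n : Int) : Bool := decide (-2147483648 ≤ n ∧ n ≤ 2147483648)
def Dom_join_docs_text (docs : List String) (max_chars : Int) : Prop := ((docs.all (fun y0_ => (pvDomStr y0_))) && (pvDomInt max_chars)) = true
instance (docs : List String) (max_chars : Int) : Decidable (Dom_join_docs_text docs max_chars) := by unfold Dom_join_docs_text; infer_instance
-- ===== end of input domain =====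

-- B builds a prefix-length table and binary-searches it for the cutoff index instead of
-- accumulating with an early break (alternative decomposition; return value only, no mutation).

-- ===== PORT A =====
-- the for-loop with break: accumulate chunks and total until total + len(st) > max_chars
def joinA_go (max_chars : Int) : List String → Int → List String → List String
  | [], _, acc => acc.reverse
  | st :: rest, total, acc =>
    if total + PySem.Str.len st > max_chars then acc.reverse
    else joinA_go max_chars rest (total + PySem.Str.len st) (st :: acc)

def join_docs_text (docs : List String) (max_chars : Int) : String :=
  PySem.Str.join " " (joinA_go max_chars docs 0 [])

-- ===== PORT B =====
-- the prefix-sum loop of Source B (cum.append(t) built front-to-back = structural recursion)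
def cumLens : List String → Int → List Int
  | [], _ => []
  | d :: rest, t => (t + PySem.Str.len d) :: cumLens rest (t + PySem.Str.len d)

-- hand-rolled bisect_right of Source B; cum[mid] is always in range at every call site
def bisectRight (cum : List Int) (x : Int) (lo hi : Nat) : Nat :=
  if h : lo < hi then
    if cum.getD ((lo + hi) / 2) 0 ≤ x then bisectRight cum x ((lo + hi) / 2 + 1) hi
    else bisectRight cum x lo ((lo + hi) / 2)
  else lo
termination_by hi - lo
decreasing_by all_goals omega

def join_docs_text_alt (docs : List String) (max_chars : Int) : String :=
  let cum := cumLens docs 0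
  let k := bisectRight cum max_chars 0 cum.length
  PySem.Str.join " " (docs.take k)

-- ===== PRECONDITION & SPEC =====
def Spec_join_docs_text (docs : List String) (max_chars : Int) (out : String) : Prop := out = join_docs_text_alt docs max_chars
instance (docs : List String) (max_chars : Int) (out : String) : Decidable (Spec_join_docs_text docs max_chars out) := by unfold Spec_join_docs_text; infer_instance

-- ===== CLAIM (what is proved, stated in full; the proofs are below) =====
def Claim_equal_join_docs_text : Prop := ∀ (docs : List String) (max_chars : Int), Dom_join_docs_text docs max_chars → Spec_join_docs_text docs max_chars (join_docs_text docs max_chars)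

-- ===== LEMMAS AND PROOFS =====

-- reference cutoff count: how many leading docs A keeps, starting from running total t
def cnt (max_chars : Int) : List String → Int → Nat
  | [], _ => 0
  | d :: rest, t => if t + PySem.Str.len d > max_chars then 0 else cnt max_chars rest (t + PySem.Str.len d) + 1

theorem joinA_go_eq (max_chars : Int) : ∀ (docs : List String) (t : Int) (acc : List String),
    joinA_go max_chars docs t acc = acc.reverse ++ docs.take (cnt max_chars docs t) := by
  intro docs
  induction docs with
  | nil => intro t acc; simp [joinA_go, cnt]
  | cons d rest ih =>
    intro t acc
    simp only [joinA_go, cnt]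
    split_ifs with h
    · simp
    · rw [ih]; simp

theorem cnt_le_length (max_chars : Int) : ∀ (docs : List String) (t : Int),
    cnt max_chars docs t ≤ docs.length := by
  intro docs
  induction docs with
  | nil => intro t; simp [cnt]
  | cons d rest ih =>
    intro t
    simp only [cnt, List.length_cons]
    split_ifs with h
    · omega
    · have := ih (t + PySem.Str.len d); omega

theorem cumLens_length : ∀ (docs : List String) (t : Int),
    (cumLens docs t).length = docs.length := by
  intro docs
  induction docs with
  | nil => intro t; simp [cumLens]
  | cons d rest ih => intro t; simp [cumLens, ih]

theorem len_nonneg (s : String) : 0 ≤ PySem.Str.len s := by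
  simp [PySem.Str.len_eq]

-- every entry of cumLens docs t is ≥ t
theorem cumLens_ge : ∀ (docs : List String) (t : Int) (i : Nat),
    i < (cumLens docs t).length → t ≤ (cumLens docs t).getD i 0 := by
  intro docs
  induction docs with
  | nil => intro t i h; simp [cumLens] at h
  | cons d rest ih =>
    intro t i h
    cases i with
    | zero => simp only [cumLens, List.getD_cons_zero]; have := len_nonneg d; omega
    | succ j =>
      simp only [cumLens, List.getD_cons_succ]
      simp only [cumLens, List.length_cons] at h
      have := ih (t + PySem.Str.len d) j (by omega)
      have := len_nonneg d
      omega

-- characterisation: the i-th prefix sum is ≤ max_chars iff i < cnt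
theorem cumLens_iff (max_chars : Int) : ∀ (docs : List String) (t : Int) (i : Nat),
    i < (cumLens docs t).length →
    ((cumLens docs t).getD i 0 ≤ max_chars ↔ i < cnt max_chars docs t) := by
  intro docs
  induction docs with
  | nil => intro t i h; simp [cumLens] at h
  | cons d rest ih =>
    intro t i h
    simp only [cumLens, List.length_cons] at h ⊢
    simp only [cnt]
    split_ifs with hbig
    · -- first prefix sum already exceeds: all entries exceed
      constructor
      · intro hle
        exfalso
        cases i with
        | zero => simp only [List.getD_cons_zero] at hle; omega
        | succ j =>
          simp only [List.getD_cons_succ] at hle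
          have := cumLens_ge rest (t + PySem.Str.len d) j (by omega)
          omega
      · intro hi; omega
    · cases i with
      | zero => simp only [List.getD_cons_zero]; omega
      | succ j =>
        simp only [List.getD_cons_succ]
        have := ih (t + PySem.Str.len d) j (by omega)
        constructor
        · intro hle; have := (this).1 hle; omega
        · intro hj; exact (this).2 (by omega)

theorem bisectRight_eq (cum : List Int) (x : Int) (k : Nat)
    (f1 : ∀ i, i < k → cum.getD i 0 ≤ x)
    (f2 : ∀ i, k ≤ i → i < cum.length → ¬ cum.getD i 0 ≤ x) :
    ∀ (d lo hi : Nat), hi - lo ≤ d → lo ≤ k → k ≤ hi → hi ≤ cum.length →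
    bisectRight cum x lo hi = k := by
  intro d
  induction d with
  | zero =>
    intro lo hi hd h1 h2 h3
    rw [bisectRight]
    rw [dif_neg (by omega)]
    omega
  | succ n ih =>
    intro lo hi hd h1 h2 h3
    rw [bisectRight]
    split_ifs with hlt hle
    · -- cum[mid] ≤ x so k ≥ mid+1
      have hk : (lo + hi) / 2 + 1 ≤ k := by
        by_contra hc
        exact f2 ((lo + hi) / 2) (by omega) (by omega) hle
      exact ih ((lo + hi) / 2 + 1) hi (by omega) hk h2 h3
    · -- cum[mid] > x so k ≤ mid
      have hk : k ≤ (lo + hi) / 2 := by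
        by_contra hc
        exact hle (f1 ((lo + hi) / 2) (by omega))
      exact ih lo ((lo + hi) / 2) (by omega) h1 hk (by omega)
    · omega

-- ===== VERDICT (by name: the statement is the Claim_ definition above) =====
theorem join_docs_text_spec : Claim_equal_join_docs_text := by
  intro docs max_chars _
  unfold Spec_join_docs_text join_docs_text join_docs_text_alt
  rw [joinA_go_eq]
  simp only [List.reverse_nil, List.nil_append]
  congr 1
  congr 1
  have hlen := cumLens_length docs 0
  have hk := cnt_le_length max_chars docs 0
  rw [bisectRight_eq (cumLens docs 0) max_chars (cnt max_chars docs 0)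
      (fun i hi => (cumLens_iff max_chars docs 0 i (by omega)).2 hi)
      (fun i hki hil h => by have := (cumLens_iff max_chars docs 0 i (by omega)).1 h; omega)
      (cumLens docs 0).length 0 (cumLens docs 0).length (by omega) (by omega) (by omega) (by omega)]
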